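-- pv_equiv track=rewrite | github.com/lappazos/Intro_Ex_5_Crossword | crossword.py | mat_w
-- ===== SOURCE A (Python) =====
-- def mat_w(mat):
--     """creates all of the possible combinations for west direction"""
--     w_words = []
--     # the for loops allow us to every time do the following - choose a row,
--     # choose starting letter and build all of the options from it
--     for row in mat:
--         # the -1 is because we run from end to start - the opposite from met_e
--         for letter in range(len(row), -1, -1):
--             for i in range(letter - 1, -1, -1):
--                 # only when i counts is 0 then there was a special append so
--                 #  we wont get out of range
--                 if i != 0:
--                     # w_words.append(row[letter - 1:i - 1:-1])
--                     w_words.append(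
--                         ''.join(str(x) for x in (row[letter - 1:i - 1:-1])))
--                 else:
--                     # w_words.append(row[letter - 1::-1])
--                     w_words.append(
--                         ''.join(str(x) for x in (row[letter - 1::-1])))
--     return w_words
-- ===== SOURCE B (Python) =====
-- def mat_w(mat):
--     """creates all of the possible combinations for west direction"""
--     w_words = []
--     for row in mat:
--         # walk the suffixes of the reversed row; for each suffix grow one
--         # accumulator string and emit every intermediate value
--         rev = [str(x) for x in reversed(row)]
--         while rev:
--             s = ''
--             for x in rev:
--                 s += x
--                 w_words.append(s)
--             rev = rev[1:]
--     return w_words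
-- ===== Notes on version B (the rewrite author's own statement) =====
-- stated objective: faster
-- what changed: B drops A's slice-and-join per word and its i==0 edge-case branch: per row it walks the suffixes of the reversed row, growing one accumulator string per suffix and emitting each intermediate value, so each new word costs one append instead of a fresh reversed slice plus a join.
import Mathlib
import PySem

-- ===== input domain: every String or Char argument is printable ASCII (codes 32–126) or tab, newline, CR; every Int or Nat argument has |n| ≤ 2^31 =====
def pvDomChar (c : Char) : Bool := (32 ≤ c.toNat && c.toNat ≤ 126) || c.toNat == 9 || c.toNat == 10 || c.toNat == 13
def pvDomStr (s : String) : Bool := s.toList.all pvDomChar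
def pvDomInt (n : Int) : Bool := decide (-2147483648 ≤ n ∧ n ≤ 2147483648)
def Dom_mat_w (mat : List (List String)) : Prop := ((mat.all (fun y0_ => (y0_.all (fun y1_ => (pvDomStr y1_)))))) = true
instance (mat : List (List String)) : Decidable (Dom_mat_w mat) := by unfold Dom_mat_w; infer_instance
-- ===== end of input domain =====

-- B builds each word by growing one accumulator string over the suffixes of the
-- reversed row instead of A's reversed slice + join per word (measured faster by
-- a timing run; constant-factor: one string append per emitted word).

-- ===== PORT A =====
-- ''.join(str(x) for x in lst): elements are strings, so str(x) = x and the join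
-- concatenates the slice; slice? with step -1 is never none, .getD [] is a totality guard.
def mat_w (mat : List (List String)) : List String :=
  mat.foldl (fun w_words row =>
    (PySem.List.pyRange (row.length : Int) (-1) (-1)).foldl (fun w_words letter =>
      (PySem.List.pyRange (letter - 1) (-1) (-1)).foldl (fun w_words i =>
        if i ≠ 0 then
          w_words ++ [PySem.Str.join "" ((PySem.List.slice? row (some (letter - 1)) (some (i - 1)) (-1)).getD [])]
        else
          w_words ++ [PySem.Str.join "" ((PySem.List.slice? row (some (letter - 1)) none (-1)).getD [])])
        w_words)
      w_words)
    []

-- ===== PORT B =====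
-- the body of Source B's inner 'for x in rev: s += x; w_words.append(s)' loop
def pvScanStep (p : List String × String) (x : String) : List String × String :=
  (p.1 ++ [p.2 ++ x], p.2 ++ x)

-- Source B's 'while rev: … ; rev = rev[1:]' loop (rev[1:] is the tail)
def pvWestLoop : List String → List String → List String
  | acc, [] => acc
  | acc, x :: rest => pvWestLoop (((x :: rest).foldl pvScanStep (acc, "")).1) rest

-- '[str(x) for x in reversed(row)]' on strings is row.reverse (str(x) = x)
def mat_w_alt (mat : List (List String)) : List String :=
  mat.foldl (fun w_words row => pvWestLoop w_words row.reverse) []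

-- ===== PRECONDITION & SPEC =====
def Spec_mat_w (mat : List (List String)) (out : List String) : Prop := out = mat_w_alt mat
instance (mat : List (List String)) (out : List String) : Decidable (Spec_mat_w mat out) := by unfold Spec_mat_w; infer_instance

-- ===== CLAIM (what is proved, stated in full; the proofs are below) =====
def Claim_equal_mat_w : Prop := ∀ (mat : List (List String)), Dom_mat_w mat → Spec_mat_w mat (mat_w mat)

-- ===== LEMMAS AND PROOFS =====

-- the list of words one suffix of the reversed row contributes
def pvScan : List String → String → List String
  | [], _ => []
  | x :: rest, s => (s ++ x) :: pvScan rest (s ++ x)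

-- all words of one (already reversed) row
def pvChunk : List String → List String
  | [] => []
  | x :: rest => pvScan (x :: rest) "" ++ pvChunk rest

theorem pvJoin_nil : PySem.Str.join "" [] = "" := rfl

theorem pvIntercalate_nil_cons (a : List Char) (l : List (List Char)) :
    List.intercalate ([] : List Char) (a :: l) = a ++ List.intercalate [] l := by
  cases l <;> simp [List.intercalate]

theorem pvJoin_cons (x : String) (l : List String) :
    PySem.Str.join "" (x :: l) = x ++ PySem.Str.join "" l := by
  simp [PySem.Str.join, PySem.Chars.join, pvIntercalate_nil_cons, String.ofList_append,
    String.ofList_toList]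

theorem pvScanStep_foldl (l : List String) (acc : List String) (s : String) :
    (l.foldl pvScanStep (acc, s)).1 = acc ++ pvScan l s := by
  induction l generalizing acc s with
  | nil => simp [pvScan]
  | cons x rest ih => simp [pvScanStep, pvScan, ih, List.append_assoc]

theorem pvWestLoop_eq (rev acc : List String) :
    pvWestLoop acc rev = acc ++ pvChunk rev := by
  induction rev generalizing acc with
  | nil => simp [pvWestLoop, pvChunk]
  | cons x rest ih =>
    rw [pvWestLoop, ih, pvScanStep_foldl, pvChunk, List.append_assoc]

theorem pvScan_eq_map (l : List String) (s : String) :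
    pvScan l s = (List.range l.length).map (fun k => s ++ PySem.Str.join "" (l.take (k + 1))) := by
  induction l generalizing s with
  | nil => simp [pvScan]
  | cons x rest ih =>
    simp only [pvScan, List.length_cons, List.range_succ_eq_map, List.map_cons, List.map_map]
    congr 1
    · simp [pvJoin_cons, pvJoin_nil]
    · rw [ih (s ++ x)]
      refine List.map_congr_left (fun k _ => ?_)
      simp [Nat.succ_eq_add_one, pvJoin_cons, String.append_assoc]

-- the filterMap inside slice? with step -1 over in-range indices
theorem pvGetSeq (xs : List String) (a c : Nat) (ha : a < xs.length) (hc : c ≤ a + 1) :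
    (List.range c).filterMap (fun (k : Nat) => xs[((a : Int) + -(k : Int)).toNat]?) =
      ((xs.drop (a + 1 - c)).take c).reverse := by
  induction c with
  | zero => simp
  | succ c ih =>
    rw [List.range_succ, List.filterMap_append, ih (by omega)]
    have h1 : ((a : Int) + -(c : Int)).toNat = a - c := by omega
    have h2 : a - c < xs.length := by omega
    have h4 : a + 1 - (c + 1) = a - c := by omega
    have h5 : a - c + 1 = a + 1 - c := by omega
    rw [h4, List.drop_eq_getElem_cons h2]
    simp [List.filterMap, h1, List.getElem?_eq_getElem h2, h5]

-- row[a : i-1 : -1] for 1 ≤ i ≤ a < len row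
theorem pvSliceL1 (xs : List String) (a : Nat) (i : Int) (h1 : 1 ≤ i) (h2 : i ≤ (a : Int))
    (ha : a < xs.length) :
    PySem.List.slice? xs (some (a : Int)) (some (i - 1)) (-1) =
      some (((xs.drop i.toNat).take (a + 1 - i.toNat)).reverse) := by
  simp only [PySem.List.slice?, PySem.List.sliceIndices]
  norm_num
  rw [if_neg (show ¬ ((a : Int) < 0) by omega),
      show min ((a : Int)) ((xs.length : Int) - 1) = (a : Int) by omega,
      if_neg (show ¬ (i < 1) by omega),
      show min (i - 1) ((xs.length : Int) - 1) = i - 1 by omega,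
      if_pos (show i - 1 < (a : Int) by omega),
      show ((a : Int) - (i - 1)).toNat = a + 1 - i.toNat by omega]
  rw [pvGetSeq xs a (a + 1 - i.toNat) ha (by omega)]
  rw [show a + 1 - (a + 1 - i.toNat) = i.toNat by omega]

-- row[a : : -1] for a < len row
theorem pvSliceL2 (xs : List String) (a : Nat) (ha : a < xs.length) :
    PySem.List.slice? xs (some (a : Int)) none (-1) = some ((xs.take (a + 1)).reverse) := by
  simp only [PySem.List.slice?, PySem.List.sliceIndices]
  norm_num
  rw [if_neg (show ¬ ((a : Int) < 0) by omega),
      show min ((a : Int)) ((xs.length : Int) - 1) = (a : Int) by omega,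
      if_pos (show (-1 : Int) < (a : Int) by omega),
      show ((a : Int) + 1).toNat = a + 1 by omega]
  rw [pvGetSeq xs a (a + 1) ha (by omega)]
  simp

-- A's inner loop over one 'letter' equals one pvScan over the reversed prefix
theorem pvGroup (row : List String) (letter : Nat) (hl : letter ≤ row.length)
    (acc : List String) :
    (PySem.List.pyRange ((letter : Int) - 1) (-1) (-1)).foldl (fun w_words i =>
        if i ≠ 0 then
          w_words ++ [PySem.Str.join "" ((PySem.List.slice? row (some ((letter : Int) - 1)) (some (i - 1)) (-1)).getD [])]
        else
          w_words ++ [PySem.Str.join "" ((PySem.List.slice? row (some ((letter : Int) - 1)) none (-1)).getD [])])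
      acc = acc ++ pvScan (row.take letter).reverse "" := by
  cases letter with
  | zero =>
    rw [PySem.List.pyRange_neg_one_eq_nil (by norm_num)]
    simp [pvScan]
  | succ m =>
    have hm : m < row.length := by omega
    have hrw : ((m + 1 : Nat) : Int) - 1 = (m : Int) := by push_cast; ring
    rw [hrw]
    rw [PySem.List.foldl_congr_mem _ _
      (fun w_words i => w_words ++
        [PySem.Str.join "" (((row.take (m + 1)).reverse).take (m + 1 - i.toNat))]) _
      (by
        intro acc' i hi
        rw [PySem.List.mem_pyRange_neg_one] at hi
        by_cases h0 : i = 0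
        · subst h0
          rw [if_neg (by simp), pvSliceL2 row m hm]
          have ht : List.take (m + 1) ((List.take (m + 1) row).reverse) =
              (List.take (m + 1) row).reverse := List.take_of_length_le (by simp)
          simp [ht]
        · have h1 : 1 ≤ i := by omega
          rw [if_pos h0, pvSliceL1 row m i h1 (by omega) hm]
          have hmin : min (m + 1) row.length = m + 1 := by omega
          have harg : m + 1 - (m + 1 - i.toNat) = i.toNat := by omega
          have ht : ((row.take (m + 1)).reverse).take (m + 1 - i.toNat) =
              ((row.drop i.toNat).take (m + 1 - i.toNat)).reverse := by
            rw [List.take_reverse, List.length_take, hmin, harg, List.drop_take]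
          simp [ht])]
    rw [PySem.List.foldl_append_eq_flatMap]
    congr 1
    rw [PySem.List.pyRange_neg_one,
      show ((m : Int) - (-1)).toNat = m + 1 by omega,
      List.flatMap_map, pvScan_eq_map,
      show ((row.take (m + 1)).reverse).length = m + 1 by simp; omega]
    have hsing : ∀ (l : List Nat) (g : Nat → String),
        l.flatMap (fun a => [g a]) = l.map g := by
      intro l g; induction l with
      | nil => rfl
      | cons x t iht => simp [iht]
    rw [hsing]
    refine List.map_congr_left (fun k hk => ?_)
    have hk' : k < m + 1 := List.mem_range.mp hk
    rw [show m + 1 - ((m : Int) - (k : Int)).toNat = k + 1 by omega]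
    simp

-- A's per-row loops equal B's pvChunk of the reversed row
theorem pvRow (row : List String) (acc : List String) :
    (PySem.List.pyRange ((row.length : Int)) (-1) (-1)).foldl (fun w_words letter =>
      (PySem.List.pyRange (letter - 1) (-1) (-1)).foldl (fun w_words i =>
        if i ≠ 0 then
          w_words ++ [PySem.Str.join "" ((PySem.List.slice? row (some (letter - 1)) (some (i - 1)) (-1)).getD [])]
        else
          w_words ++ [PySem.Str.join "" ((PySem.List.slice? row (some (letter - 1)) none (-1)).getD [])])
        w_words)
      acc = acc ++ pvChunk row.reverse := by
  rw [PySem.List.foldl_congr_mem _ _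
    (fun w_words letter => w_words ++ pvScan (row.take letter.toNat).reverse "") _
    (by
      intro acc' letter hl
      rw [PySem.List.mem_pyRange_neg_one] at hl
      obtain ⟨k, rfl⟩ : ∃ k : Nat, letter = (k : Int) := ⟨letter.toNat, by omega⟩
      show _ = acc' ++ pvScan (row.take ((k : Int)).toNat).reverse ""
      rw [Int.toNat_natCast]
      exact pvGroup row k (by omega) acc')]
  rw [PySem.List.foldl_append_eq_flatMap]
  congr 1
  induction row using List.reverseRecOn with
  | nil =>
    rw [show ((([] : List String).length : Nat) : Int) = 0 by simp,
      PySem.List.pyRange_neg_one_cons (by norm_num),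
      PySem.List.pyRange_neg_one_eq_nil (by norm_num)]
    simp [pvScan, pvChunk]
  | append_singleton ys y ih =>
    rw [show (((ys ++ [y]).length : Nat) : Int) = (ys.length : Int) + 1 by simp,
      PySem.List.pyRange_neg_one_cons (by omega), List.flatMap_cons]
    have hfull : (ys ++ [y]).take (((ys.length : Int) + 1)).toNat = ys ++ [y] := by
      rw [show (((ys.length : Int) + 1)).toNat = ys.length + 1 by omega]
      simp
    rw [hfull]
    have hrest : (PySem.List.pyRange ((ys.length : Int) + 1 - 1) (-1) (-1)).flatMap
        (fun letter => pvScan ((ys ++ [y]).take letter.toNat).reverse "") =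
        (PySem.List.pyRange ((ys.length : Int)) (-1) (-1)).flatMap
        (fun letter => pvScan (ys.take letter.toNat).reverse "") := by
      rw [show (ys.length : Int) + 1 - 1 = ((ys.length : Nat) : Int) by ring]
      refine List.flatMap_congr (fun letter hl => ?_)
      rw [PySem.List.mem_pyRange_neg_one] at hl
      rw [List.take_append_of_le_length (by omega)]
    rw [hrest, ih]
    have hrev : (ys ++ [y]).reverse = y :: ys.reverse := by simp
    rw [hrev, pvChunk]

-- ===== VERDICT (by name: the statement is the Claim_ definition above) =====
theorem mat_w_spec : Claim_equal_mat_w := by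
  intro mat hd
  unfold Spec_mat_w mat_w mat_w_alt
  induction mat using List.reverseRecOn with
  | nil => rfl
  | append_singleton rows row ih =>
    have hd' : Dom_mat_w rows := by
      unfold Dom_mat_w at hd ⊢
      simp only [List.all_append] at hd
      exact (Bool.and_eq_true _ _ |>.mp hd).1
    rw [List.foldl_append, List.foldl_append, ih hd']
    simp only [List.foldl_cons, List.foldl_nil]
    rw [pvRow, pvWestLoop_eq]
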